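-- pv_equiv track=rewrite | github.com/caduuv/ifce.logcomp.projetopratico | restrictions_cnf.py | restriction2
-- ===== SOURCE A (Python) =====
-- def restriction2(rules_num, attributes):
--     list_clauses = []
--     for rule in range(0, rules_num):
--         list_ors = []
--         for attr in range(0, len(attributes) - 1):
--             list_ors.append(-1* ( (3*attr)  +     (3*(len(attributes)-1)*rule)    +   3  ))
--         list_clauses.append(list_ors)
--     return(list_clauses)
-- ===== SOURCE B (Python) =====
-- def restriction2(rules_num, attributes):
--     # Generate the whole flat arithmetic sequence -3, -6, -9, ... in one pass,
--     # then reshape it into rows by slicing.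
--     width = max(len(attributes) - 1, 0)
--     flat = [-3 * (i + 1) for i in range(rules_num * width)]
--     return [flat[r * width:(r + 1) * width] for r in range(rules_num)]
-- ===== Notes on version B (the rewrite author's own statement) =====
-- stated objective: alternative
-- what changed: B generates the flat arithmetic sequence -3,-6,-9,... in a single pass and reshapes it into rows by slicing, replacing A's nested loops that recompute each entry with per-rule/per-attribute index arithmetic.
import Mathlib
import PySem

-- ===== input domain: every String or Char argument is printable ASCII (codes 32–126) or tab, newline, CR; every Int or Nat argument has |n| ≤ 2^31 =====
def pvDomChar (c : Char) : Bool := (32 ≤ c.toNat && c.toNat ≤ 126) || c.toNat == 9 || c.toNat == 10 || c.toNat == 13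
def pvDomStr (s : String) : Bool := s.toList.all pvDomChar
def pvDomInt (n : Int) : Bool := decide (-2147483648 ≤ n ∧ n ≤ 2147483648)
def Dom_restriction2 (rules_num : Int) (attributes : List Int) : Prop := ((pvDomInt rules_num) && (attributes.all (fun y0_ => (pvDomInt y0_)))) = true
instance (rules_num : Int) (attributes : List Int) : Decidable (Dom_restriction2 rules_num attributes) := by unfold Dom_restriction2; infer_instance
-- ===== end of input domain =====

-- B generates the flat sequence -3,-6,-9,... once and reshapes it into rows by slicing,
-- replacing A's nested per-element index arithmetic (alternative decomposition, same cost).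


-- ===== PORT A =====
def restriction2 (rules_num : Int) (attributes : List Int) : List (List Int) :=
  (PySem.List.pyRange 0 rules_num 1).foldl (fun list_clauses rule =>
    let list_ors :=
      (PySem.List.pyRange 0 ((attributes.length : Int) - 1) 1).foldl (fun list_ors attr =>
        list_ors ++ [-1 * ((3 * attr) + (3 * ((attributes.length : Int) - 1) * rule) + 3)]) []
    list_clauses ++ [list_ors]) []

-- ===== PORT B =====
def restriction2_alt (rules_num : Int) (attributes : List Int) : List (List Int) :=
  let width : Int := max ((attributes.length : Int) - 1) 0
  let flat : List Int := (PySem.List.pyRange 0 (rules_num * width) 1).map (fun i => -3 * (i + 1))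
  (PySem.List.pyRange 0 rules_num 1).map (fun r =>
    PySem.List.slice flat (some (r * width)) (some ((r + 1) * width)))

-- ===== PRECONDITION & SPEC =====
def Spec_restriction2 (rules_num : Int) (attributes : List Int) (out : List (List Int)) : Prop := out = restriction2_alt rules_num attributes
instance (rules_num : Int) (attributes : List Int) (out : List (List Int)) : Decidable (Spec_restriction2 rules_num attributes out) := by unfold Spec_restriction2; infer_instance

-- ===== CLAIM (what is proved, stated in full; the proofs are below) =====
def Claim_equal_restriction2 : Prop := ∀ (rules_num : Int) (attributes : List Int), Dom_restriction2 rules_num attributes → Spec_restriction2 rules_num attributes (restriction2 rules_num attributes)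

-- ===== LEMMAS AND PROOFS =====

/-- A loop that only appends singletons is a map. -/
theorem pv_foldl_pushback {α β : Type} (g : α → β) (l : List α) (init : List β) :
    l.foldl (fun acc x => acc ++ [g x]) init = init ++ l.map g := by
  induction l generalizing init with
  | nil => simp
  | cons x xs ih => simp [List.foldl_cons, ih]

/-- Taking a prefix of `range'`. -/
theorem pv_take_range' (s n m : Nat) (h : m ≤ n) : (List.range' s n).take m = List.range' s m := by
  have hh : n = m + (n - m) := by omega
  rw [hh, ← List.range'_append_1]
  simp

/-- One row of B's reshaping equals the corresponding row of A, for 0 ≤ ρ < r. -/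
theorem pv_row_eq (L : Nat) (r ρ : Int) (hρ0 : 0 ≤ ρ) (hρr : ρ < r) :
    PySem.List.slice
      ((PySem.List.pyRange 0 (r * max ((L : Int) - 1) 0) 1).map (fun i => -3 * (i + 1)))
      (some (ρ * max ((L : Int) - 1) 0)) (some ((ρ + 1) * max ((L : Int) - 1) 0)) =
    (PySem.List.pyRange 0 ((L : Int) - 1) 1).map
      (fun attr => -1 * ((3 * attr) + (3 * ((L : Int) - 1) * ρ) + 3)) := by
  by_cases hL : (L : Int) - 1 ≤ 0
  · -- width = 0: row is an empty slice, A's row is an empty range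
    rw [max_eq_right hL, PySem.List.pyRange_one_eq_nil hL]
    simp [PySem.List.slice]
  · rw [not_le] at hL
    have hW : max ((L : Int) - 1) 0 = ((L : Int) - 1) := max_eq_left (le_of_lt hL)
    rw [hW]
    obtain ⟨w, hw⟩ : ∃ w : Nat, (L : Int) - 1 = (w : Int) := ⟨(L - 1 : Nat), by omega⟩
    obtain ⟨k, hk⟩ : ∃ k : Nat, ρ = (k : Int) := ⟨ρ.toNat, by omega⟩
    obtain ⟨n, hn⟩ : ∃ n : Nat, r = (n : Int) := ⟨r.toNat, by omega⟩
    subst hk hn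
    rw [hw]
    have hkn : k < n := by exact_mod_cast hρr
    have h1 : ((k : Int)) * (w : Int) = ((k * w : Nat) : Int) := by push_cast; ring
    have h2 : ((k : Int) + 1) * (w : Int) = ((k * w : Nat) : Int) + ((w : Nat) : Int) := by
      push_cast; ring
    have h3 : ((n : Int)) * (w : Int) = ((n * w : Nat) : Int) := by push_cast; ring
    rw [h1, h2, h3, PySem.List.slice_natCast_add, PySem.List.pyRange_one, PySem.List.pyRange_one]
    simp only [Int.sub_zero, Int.toNat_natCast, List.map_map]
    rw [← List.map_drop, ← List.map_take, List.range_eq_range', List.drop_range']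
    simp only [Nat.zero_add, Nat.mul_one]
    have hle : w ≤ n * w - k * w := by
      have h1 : n * w - k * w = (n - k) * w := (Nat.sub_mul n k w).symm
      have h2 : 1 * w ≤ (n - k) * w := mul_le_mul_left (by omega : 1 ≤ n - k) w
      omega
    rw [pv_take_range' _ _ _ hle, List.range'_eq_map_range]
    simp only [List.map_map]
    apply List.map_congr_left
    intro a _
    simp only [Function.comp_apply]
    push_cast
    ring

/-- B in closed row form. -/
theorem pv_alt_rows (rules_num : Int) (attributes : List Int) :
    restriction2_alt rules_num attributes =
    (PySem.List.pyRange 0 rules_num 1).map (fun rule =>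
      (PySem.List.pyRange 0 ((attributes.length : Int) - 1) 1).map
        (fun attr => -1 * ((3 * attr) + (3 * ((attributes.length : Int) - 1) * rule) + 3))) := by
  unfold restriction2_alt
  apply List.map_congr_left
  intro ρ hρ
  rw [PySem.List.mem_pyRange_one] at hρ
  exact pv_row_eq attributes.length rules_num ρ hρ.1 hρ.2

-- ===== VERDICT (by name: the statement is the Claim_ definition above) =====
theorem restriction2_spec : Claim_equal_restriction2 := by
  intro rules_num attributes _
  unfold Spec_restriction2 restriction2
  rw [pv_alt_rows]
  rw [pv_foldl_pushback]
  simp only [List.nil_append]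
  apply List.map_congr_left
  intro ρ _
  rw [pv_foldl_pushback]
  simp
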